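-- pv_equiv track=rewrite | github.com/JemyHo/F29AI---CW | Part 1/sudoku_solver.py | has_duplicates_nonzero
-- ===== SOURCE A (Python) =====
-- from typing import List, Set, Tuple, Dict, Optional, Iterable
--
-- def has_duplicates_nonzero(seq):
--     #Return True if seq contains duplicate non-zero values.
--     seen: Set[int] = set()
--     for v in seq:
--         if v != 0:
--             if v in seen:
--                 return True
--             seen.add(v)
--     return False
-- ===== SOURCE B (Python) =====
-- def has_duplicates_nonzero(seq):
--     # Sort the non-zero values; any duplicate shows up as an adjacent equal pair.
--     nz = sorted(v for v in seq if v != 0)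
--     return any(a == b for a, b in zip(nz, nz[1:]))
-- ===== Notes on version B (the rewrite author's own statement) =====
-- stated objective: alternative
-- what changed: Replaces the incremental seen-set with early exit by sort-then-scan: sort the non-zero values and report a duplicate iff some adjacent pair of the sorted list is equal.
import Mathlib
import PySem

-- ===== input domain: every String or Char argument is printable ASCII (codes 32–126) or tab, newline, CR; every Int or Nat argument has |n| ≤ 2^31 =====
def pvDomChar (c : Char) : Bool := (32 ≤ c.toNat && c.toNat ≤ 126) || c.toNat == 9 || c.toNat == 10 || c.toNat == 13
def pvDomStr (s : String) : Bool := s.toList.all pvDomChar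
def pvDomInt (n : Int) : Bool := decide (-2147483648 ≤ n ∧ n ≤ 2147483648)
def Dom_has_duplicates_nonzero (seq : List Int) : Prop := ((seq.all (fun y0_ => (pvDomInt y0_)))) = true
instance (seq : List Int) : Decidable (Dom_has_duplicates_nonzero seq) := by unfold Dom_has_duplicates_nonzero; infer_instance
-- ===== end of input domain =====

-- B sorts the non-zero values and scans adjacent pairs for equality
-- (alternative sort-then-scan algorithm; no seen-set or early exit).

-- ===== PORT A =====
def hdnzLoop (seen : PySem.Set Int) : List Int → Bool
  | [] => false
  | v :: rest =>
    if v ≠ 0 then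
      if PySem.Set.contains seen v then true
      else hdnzLoop (PySem.Set.add seen v) rest
    else hdnzLoop seen rest

def has_duplicates_nonzero (seq : List Int) : Bool :=
  hdnzLoop PySem.Set.empty seq

-- ===== PORT B =====
-- any(a == b for a, b in zip(nz, nz[1:])): structural scan of adjacent pairs
def adjEq : List Int → Bool
  | a :: b :: t => a == b || adjEq (b :: t)
  | _ => false

def has_duplicates_nonzero_alt (seq : List Int) : Bool :=
  let nz := PySem.List.sorted (seq.filter (fun v => v != 0)) (fun x => x) false
  adjEq nz

-- ===== PRECONDITION & SPEC =====
def Spec_has_duplicates_nonzero (seq : List Int) (out : Bool) : Prop := out = has_duplicates_nonzero_alt seq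
instance (seq : List Int) (out : Bool) : Decidable (Spec_has_duplicates_nonzero seq out) := by unfold Spec_has_duplicates_nonzero; infer_instance

-- ===== CLAIM (what is proved, stated in full; the proofs are below) =====
def Claim_equal_has_duplicates_nonzero : Prop := ∀ (seq : List Int), Dom_has_duplicates_nonzero seq → Spec_has_duplicates_nonzero seq (has_duplicates_nonzero seq)

-- ===== LEMMAS AND PROOFS =====

theorem nodup_append_singleton {s : List Int} {v : Int} (hs : s.Nodup) (hv : v ∉ s) :
    (s ++ [v]).Nodup := by
  rw [List.nodup_append]
  refine ⟨hs, List.nodup_singleton v, ?_⟩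
  intro a ha b hb he
  rw [List.mem_singleton] at hb
  exact hv (hb ▸ he ▸ ha)

theorem not_nodup_append_cons {s l : List Int} {v : Int} (hv : v ∈ s) :
    ¬ (s ++ v :: l).Nodup := by
  intro h
  rw [List.nodup_append] at h
  exact h.2.2 v hv v List.mem_cons_self rfl

-- A's loop returns true exactly when seen ++ (non-zero filter of the rest) has a repeat
theorem hdnzLoop_eq (seq : List Int) : ∀ (seen : List Int), seen.Nodup →
    hdnzLoop seen seq = !decide ((seen ++ seq.filter (fun v => v != 0)).Nodup) := by
  induction seq with
  | nil => intro seen hs; simp [hdnzLoop, hs]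
  | cons v seq ih =>
    intro seen hs
    simp only [hdnzLoop, List.filter_cons]
    by_cases h0 : v = 0
    · subst h0
      simp only [ne_eq, not_true_eq_false, if_false, bne_self_eq_false,
        Bool.false_eq_true]
      exact ih seen hs
    · have hb : (v != (0 : Int)) = true := by simp [bne, h0]
      simp only [ne_eq, h0, not_false_eq_true, if_true, hb]
      by_cases hv : v ∈ seen
      · simp only [PySem.Set.contains, List.contains_eq_mem, hv, decide_true, if_true]
        simp [not_nodup_append_cons hv]
      · simp only [PySem.Set.contains, List.contains_eq_mem, hv, decide_false,
          Bool.false_eq_true, if_false, PySem.Set.add]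
        have hs' : (seen ++ [v]).Nodup := nodup_append_singleton hs hv
        rw [ih (seen ++ [v]) hs', List.append_assoc, List.singleton_append]

-- On a list sorted by ≤, an adjacent equal pair exists exactly when the list repeats
theorem adjEq_eq_not_nodup : ∀ (l : List Int), l.Pairwise (· ≤ ·) →
    adjEq l = !decide l.Nodup := by
  intro l
  induction l with
  | nil => intro _; simp [adjEq]
  | cons a t ih =>
    intro hp
    cases t with
    | nil => simp [adjEq]
    | cons b t =>
      have hab : a ≤ b := (List.pairwise_cons.mp hp).1 b List.mem_cons_self
      have hpt : (b :: t).Pairwise (· ≤ ·) := (List.pairwise_cons.mp hp).2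
      by_cases he : a = b
      · subst he
        have : ¬ (a :: a :: t).Nodup := by
          intro h
          exact (List.nodup_cons.mp h).1 List.mem_cons_self
        simp [adjEq, this]
      · have hlt : a < b := lt_of_le_of_ne hab he
        have hna : a ∉ b :: t := by
          intro hm
          rcases List.mem_cons.mp hm with h | h
          · exact he h
          · have hble : ∀ y ∈ t, b ≤ y := (List.pairwise_cons.mp hpt).1
            exact absurd (lt_of_lt_of_le hlt (hble a h)) (lt_irrefl a)
        have : (a :: b :: t).Nodup ↔ (b :: t).Nodup := by
          rw [List.nodup_cons]
          exact ⟨fun h => h.2, fun h => ⟨hna, h⟩⟩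
        have hbe : (a == b) = false := by simp [he]
        simp only [adjEq, hbe, Bool.false_or, ih hpt, this]

-- ===== VERDICT (by name: the statement is the Claim_ definition above) =====
theorem has_duplicates_nonzero_spec : Claim_equal_has_duplicates_nonzero := by
  intro seq _
  show has_duplicates_nonzero seq = has_duplicates_nonzero_alt seq
  unfold has_duplicates_nonzero has_duplicates_nonzero_alt
  rw [show (PySem.Set.empty : PySem.Set Int) = ([] : List Int) from rfl,
      hdnzLoop_eq seq [] List.nodup_nil]
  simp only [List.nil_append]
  set nz := seq.filter (fun v => v != 0) with hnz
  have hperm : (PySem.List.sorted nz (fun x => x) false).Perm nz :=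
    PySem.List.sorted_perm nz (fun x => x) false
  have hpw : (PySem.List.sorted nz (fun x => x) false).Pairwise
      (fun a b => (fun x => x) a ≤ (fun x => x) b) :=
    PySem.List.sorted_pairwise nz (fun x => x)
  rw [adjEq_eq_not_nodup _ hpw]
  exact congrArg (fun b => !b) (decide_eq_decide.mpr hperm.nodup_iff.symm)
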